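-- pv_equiv track=rewrite | github.com/rak3n/Google-Foobar-2k20 | lvl-4/running-with-bunnies.py | rescue_bunnies
-- ===== SOURCE A (Python) =====
-- from itertools import permutations, combinations, chain
--
-- def rescue_bunnies(path,time):
--     n=len(path)-2
--     rabbits=range(n)
--     result=[]
--     """Generating Powerset of rabbits"""
--     powerset=list(chain.from_iterable(combinations(rabbits,i) for i in range(n+1)))
--
--     for sub in powerset:
--         for perm in permutations(sub):
--             total_time=0
--             prev,nxt=0,0
--             for bunny in perm:
--                 nxt=bunny+1
--                 total_time+=path[prev][nxt]
--                 prev=nxt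
--             total_time+=path[prev][n+1]
--             if total_time <= time and len(sub) > len(result):
--                 result=list(sub)
--                 if len(result)==n:
--                     break
--             else:
--                 continue
--     return result
-- ===== SOURCE B (Python) =====
-- from itertools import combinations
--
--
-- def rescue_bunnies(path, time):
--     n = len(path) - 2
--     size = 1 << n
--     # dp[mask][pos]: minimal time to walk from station pos (0 = start, j+1 = bunny j)
--     # to the bulkhead (n+1) picking up exactly the bunnies in the bitmask `mask`.
--     dp = [[path[pos][n + 1] for pos in range(n + 1)]]
--     for mask in range(1, size):
--         row = []
--         for pos in range(n + 1):
--             row.append(min(path[pos][k + 1] + dp[mask - (1 << k)][k + 1]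
--                            for k in range(n) if (mask >> k) & 1))
--         dp.append(row)
--     best = []
--     for r in range(n + 1):
--         for sub in combinations(range(n), r):
--             if len(sub) > len(best):
--                 mask = 0
--                 for j in sub:
--                     mask += 1 << j
--                 if dp[mask][0] <= time:
--                     best = list(sub)
--     return best
-- ===== Notes on version B (the rewrite author's own statement) =====
-- stated objective: alternative
-- what changed: A tries every permutation of every bunny subset; B computes each subset's minimal route time once with a forward Held-Karp bitmask DP (dp[mask][pos] = min time from station pos through exactly mask's bunnies to the bulkhead) and then just looks up dp[mask][0] per subset.
-- outside the precondition, e.g. on rescue_bunnies([[0]], 0): A returns [], B raises ValueError; on rescue_bunnies([], 0): A returns [], B raises ValueError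
import Mathlib
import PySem

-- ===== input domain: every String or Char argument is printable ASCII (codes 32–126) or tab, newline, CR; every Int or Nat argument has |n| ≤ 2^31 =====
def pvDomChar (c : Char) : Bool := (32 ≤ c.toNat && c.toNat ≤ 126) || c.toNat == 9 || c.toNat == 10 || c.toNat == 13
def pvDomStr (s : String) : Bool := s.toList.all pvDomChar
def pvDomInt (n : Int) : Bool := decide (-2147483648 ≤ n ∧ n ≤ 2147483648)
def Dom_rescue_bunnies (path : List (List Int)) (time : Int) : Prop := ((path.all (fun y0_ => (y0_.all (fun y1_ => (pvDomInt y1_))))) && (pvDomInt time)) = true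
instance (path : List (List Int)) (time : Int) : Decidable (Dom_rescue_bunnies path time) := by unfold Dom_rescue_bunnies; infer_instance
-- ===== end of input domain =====

-- B replaces A's per-subset permutation enumeration by a forward Held–Karp bitmask
-- DP over subsets (objective: alternative algorithm).

-- ===== PORT A =====

-- path[i][j]; exact for the nonnegative, in-range indices guaranteed by Pre_ (Python raises otherwise)
def mat (path : List (List Int)) (i j : Int) : Int := (path.getD i.toNat []).getD j.toNat 0

-- itertools.combinations(xs, r), in Python's (lexicographic-by-position) order
def combs : List Int → Nat → List (List Int)
  | _, 0 => [[]]
  | [], _ + 1 => []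
  | x :: xs, r + 1 => ((combs xs r).map (fun c => x :: c)) ++ combs xs (r + 1)

-- all ways to pick one element (with the remaining list, order kept)
def picks : List Int → List (Int × List Int)
  | [] => []
  | x :: xs => (x, xs) :: (picks xs).map (fun p => (p.1, x :: p.2))

-- needed by `perms` for termination
theorem picks_snd_length : ∀ (l : List Int), ∀ p ∈ picks l, p.2.length + 1 = l.length := by
  intro l
  induction l with
  | nil => simp [picks]
  | cons x xs ih =>
    intro p hp
    simp only [picks, List.mem_cons, List.mem_map] at hp
    rcases hp with h | ⟨q, hq, rfl⟩
    · subst h; simp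
    · have := ih q hq; simp [List.length_cons]; omega

-- itertools.permutations(l), in Python's order
def perms (l : List Int) : List (List Int) :=
  match l with
  | [] => [[]]
  | x :: xs =>
    (picks (x :: xs)).attach.flatMap (fun p => (perms p.1.2).map (fun q => p.1.1 :: q))
termination_by l.length
decreasing_by
  have := picks_snd_length (x :: xs) p.1 p.2
  simp at this ⊢; omega

-- the inner `for perm in permutations(sub)` loop of A, with its break
def permScan (path : List (List Int)) (time n : Int) (sub : List Int) :
    List (List Int) → List Int → List Int
  | [], result => result
  | perm :: rest, result =>
    let t := perm.foldl (fun (st : Int × Int) bunny => (st.1 + mat path st.2 (bunny + 1), bunny + 1)) ((0 : Int), (0 : Int))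
    let total := t.1 + mat path t.2 (n + 1)
    if total ≤ time ∧ sub.length > result.length then
      if (sub.length : Int) = n then sub
      else permScan path time n sub rest sub
    else permScan path time n sub rest result

def rescue_bunnies (path : List (List Int)) (time : Int) : List Int :=
  let n : Int := (path.length : Int) - 2
  let rabbits : List Int := PySem.List.pyRange 0 n 1
  let powerset : List (List Int) := (List.range (n + 1).toNat).flatMap (fun i => combs rabbits i)
  powerset.foldl (fun result sub => permScan path time n sub (perms sub) result) []

-- ===== PORT B =====

-- min(...) of a nonempty list; Python raises on an empty one (unreachable under Pre_)
def pyMinList : List Int → Int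
  | [] => 0
  | x :: xs => xs.foldl min x

def rescue_bunnies_alt (path : List (List Int)) (time : Int) : List Int :=
  let n : Int := (path.length : Int) - 2
  let nn : Nat := n.toNat      -- n ≥ 0 under Pre_ (Python B raises `1 << n` for n < 0)
  let size : Nat := 2 ^ nn
  -- dp[mask][pos]: min time from station pos to the bulkhead picking up exactly mask's bunnies
  let dp : List (List Int) :=
    (List.range' 1 (size - 1)).foldl
      (fun dp mask =>
        dp ++ [(List.range (nn + 1)).map (fun (pos : Nat) =>
          pyMinList ((List.range nn).filterMap (fun k =>
            if mask.testBit k then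
              some (mat path pos (k + 1) + (dp.getD (mask - 2 ^ k) []).getD (k + 1) 0)
            else none)))])
      [(List.range (nn + 1)).map (fun (pos : Nat) => mat path pos (n + 1))]
  let rabbits : List Int := PySem.List.pyRange 0 n 1
  (List.range (nn + 1)).foldl
    (fun best r =>
      (combs rabbits r).foldl
        (fun best sub =>
          if sub.length > best.length then
            if (dp.getD (sub.foldl (fun m j => m + 2 ^ j.toNat) 0) []).getD 0 0 ≤ time then sub
            else best
          else best)
        best)
    []

-- ===== PRECONDITION & SPEC =====
-- Pre_ excludes (a) ragged matrices, on which A raises IndexError, and (b) degenerate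
-- matrices with fewer than the start and exit stations (len(path) < 2), on which A
-- trivially returns [] while B's bitmask sizing `1 << (len(path) - 2)` raises ValueError.
def Pre_rescue_bunnies (path : List (List Int)) (time : Int) : Prop :=
  2 ≤ path.length ∧ ∀ row ∈ path.dropLast, path.length ≤ row.length

instance (path : List (List Int)) (time : Int) : Decidable (Pre_rescue_bunnies path time) := by
  unfold Pre_rescue_bunnies; infer_instance

def pvWitness_rescue_bunnies : List (List Int) × Int := ([[0, 2], [0, 0]], 0)

def Spec_rescue_bunnies (path : List (List Int)) (time : Int) (out : List Int) : Prop := out = rescue_bunnies_alt path time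
instance (path : List (List Int)) (time : Int) (out : List Int) : Decidable (Spec_rescue_bunnies path time out) := by unfold Spec_rescue_bunnies; infer_instance

-- ===== CLAIM (what is proved, stated in full; the proofs are below) =====
def Claim_equal_rescue_bunnies : Prop := ∀ (path : List (List Int)) (time : Int), Dom_rescue_bunnies path time → Pre_rescue_bunnies path time → Spec_rescue_bunnies path time (rescue_bunnies path time)

-- ===== LEMMAS AND PROOFS =====

-- proof-side cost of route prev → p… → bulkhead (what A's inner loop computes)
def FC (path : List (List Int)) (n prev : Int) : List Int → Int
  | [] => mat path prev (n + 1)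
  | b :: bs => mat path prev (b + 1) + FC path n (b + 1) bs

-- proof-side Held–Karp value: min cost from pos through exactly mask's bunnies to the bulkhead
def Gm (path : List (List Int)) (nn : Nat) (pos : Int) (m : Nat) : Int :=
  if h : m = 0 then mat path pos ((nn : Int) + 1)
  else pyMinList (((List.range nn).filter (fun k => m.testBit k)).attach.map
    (fun kk => mat path pos ((kk.1 : Int) + 1) + Gm path nn ((kk.1 : Int) + 1) (m - 2 ^ kk.1)))
termination_by m
decreasing_by exact Nat.sub_lt (Nat.pos_of_ne_zero h) (Nat.two_pow_pos kk.1)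

def maskOf (sub : List Int) : Nat := sub.foldl (fun m j => m + 2 ^ j.toNat) 0

theorem map_attach_eq {α β : Type} (l : List α) (f : α → β) :
    l.attach.map (fun kk => f kk.1) = l.map f := List.attach_map_val

theorem Gm_eq (path : List (List Int)) (nn : Nat) (pos : Int) (m : Nat) (h : m ≠ 0) :
    Gm path nn pos m = pyMinList (((List.range nn).filter (fun k => m.testBit k)).map
      (fun (k : Nat) => mat path pos ((k : Int) + 1) + Gm path nn ((k : Int) + 1) (m - 2 ^ k))) := by
  rw [Gm, dif_neg h]
  congr 1
  exact map_attach_eq _ (fun (k : Nat) => mat path pos ((k : Int) + 1) + Gm path nn ((k : Int) + 1) (m - 2 ^ k))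

theorem flatMap_attach {α β : Type} (l : List α) (f : α → List β) :
    l.attach.flatMap (fun p => f p.1) = l.flatMap f := by
  rw [List.flatMap_def, List.flatMap_def]
  congr 1
  exact map_attach_eq l f

theorem perms_cons (x : Int) (xs : List Int) :
    perms (x :: xs) = (picks (x :: xs)).flatMap (fun p => (perms p.2).map (fun q => p.1 :: q)) := by
  rw [perms]
  exact flatMap_attach (picks (x :: xs)) (fun a => (perms a.2).map (fun q => a.1 :: q))

-- ---- min-list facts ----
theorem foldl_min_le (xs : List Int) (a : Int) :
    xs.foldl min a ≤ a ∧ ∀ y ∈ xs, xs.foldl min a ≤ y := by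
  induction xs generalizing a with
  | nil => simp
  | cons y ys ih =>
    have h := ih (min a y)
    constructor
    · exact le_trans h.1 (min_le_left _ _)
    · intro z hz
      rcases List.mem_cons.1 hz with rfl | hz
      · exact le_trans h.1 (min_le_right _ _)
      · exact h.2 z hz

theorem foldl_min_mem (xs : List Int) (a : Int) : xs.foldl min a = a ∨ xs.foldl min a ∈ xs := by
  induction xs generalizing a with
  | nil => simp
  | cons y ys ih =>
    rcases ih (min a y) with h | h
    · rcases min_choice a y with h' | h' <;> rw [List.foldl_cons, h, h']
      · exact Or.inl rfl
      · exact Or.inr (List.mem_cons_self)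
    · exact Or.inr (List.mem_cons_of_mem _ h)

theorem pyMinList_le (l : List Int) : ∀ y ∈ l, pyMinList l ≤ y := by
  cases l with
  | nil => simp
  | cons x xs =>
    intro y hy
    rcases List.mem_cons.1 hy with rfl | hy
    · exact (foldl_min_le xs y).1
    · exact (foldl_min_le xs x).2 y hy

theorem pyMinList_mem (l : List Int) (h : l ≠ []) : pyMinList l ∈ l := by
  cases l with
  | nil => exact absurd rfl h
  | cons x xs =>
    rcases foldl_min_mem xs x with h' | h'
    · rw [pyMinList, h']; exact List.mem_cons_self
    · exact List.mem_cons_of_mem _ h'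

-- ---- maskOf facts ----
theorem maskOf_foldl : ∀ (sub : List Int) (a : Nat),
    sub.foldl (fun m j => m + 2 ^ j.toNat) a = a + maskOf sub := by
  intro sub
  induction sub with
  | nil => intro a; simp [maskOf]
  | cons b bs ih =>
    intro a
    have h1 : maskOf (b :: bs) = (0 + 2 ^ b.toNat) + maskOf bs := by
      rw [maskOf, List.foldl_cons, ih]
    rw [List.foldl_cons, ih, h1]
    omega

theorem maskOf_cons (b : Int) (l : List Int) : maskOf (b :: l) = 2 ^ b.toNat + maskOf l := by
  rw [maskOf, List.foldl_cons, maskOf_foldl]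
  omega

theorem maskOf_append (l1 l2 : List Int) : maskOf (l1 ++ l2) = maskOf l1 + maskOf l2 := by
  induction l1 with
  | nil => simp [maskOf]
  | cons b bs ih =>
    rw [List.cons_append, maskOf_cons, ih, maskOf_cons]
    omega

theorem maskOf_singleton (b : Int) : maskOf [b] = 2 ^ b.toNat := by
  rw [maskOf_cons]
  simp [maskOf]

-- sum of distinct powers below B is < 2^B
theorem maskOf_lt_pow : ∀ (sub : List Int), sub.Pairwise (· < ·) → ∀ (B : Nat),
    (∀ x ∈ sub, 0 ≤ x ∧ x < (B : Int)) → maskOf sub < 2 ^ B := by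
  intro sub
  induction sub using List.reverseRecOn with
  | nil => intro _ B _; simp only [maskOf, List.foldl_nil]; positivity
  | append_singleton l c ih =>
    intro hs B hb
    have hc := hb c (by simp)
    have hl : ∀ x ∈ l, 0 ≤ x ∧ x < (c.toNat : Int) := by
      intro x hx
      have hlt : x < c := (List.pairwise_append.1 hs).2.2 x hx c (by simp)
      have := hb x (List.mem_append_left _ hx)
      exact ⟨this.1, by omega⟩
    have hml : maskOf l < 2 ^ c.toNat := ih (List.pairwise_append.1 hs).1 c.toNat hl
    have h1 : maskOf (l ++ [c]) = maskOf l + 2 ^ c.toNat := by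
      rw [maskOf_append, maskOf_singleton]
    have h2 : c.toNat < B := by omega
    have h3 : (2 : Nat) ^ (c.toNat + 1) ≤ 2 ^ B := Nat.pow_le_pow_right (by norm_num) (by omega)
    have h4 : (2 : Nat) ^ (c.toNat + 1) = 2 ^ c.toNat + 2 ^ c.toNat := by ring
    omega

theorem testBit_maskOf : ∀ (sub : List Int), sub.Pairwise (· < ·) → (∀ x ∈ sub, 0 ≤ x) →
    ∀ k : Nat, (maskOf sub).testBit k = true ↔ (k : Int) ∈ sub := by
  intro sub
  induction sub using List.reverseRecOn with
  | nil => intro _ _ k; simp [maskOf]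
  | append_singleton l c ih =>
    intro hs hb k
    have hc0 : 0 ≤ c := hb c (by simp)
    have hl : ∀ x ∈ l, 0 ≤ x ∧ x < (c.toNat : Int) := by
      intro x hx
      have hlt : x < c := (List.pairwise_append.1 hs).2.2 x hx c (by simp)
      have := hb x (List.mem_append_left _ hx)
      exact ⟨this, by omega⟩
    have hml : maskOf l < 2 ^ c.toNat :=
      maskOf_lt_pow l (List.pairwise_append.1 hs).1 c.toNat hl
    have hmm : maskOf (l ++ [c]) = 2 ^ c.toNat + maskOf l := by
      rw [maskOf_append, maskOf_singleton]; omega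
    have hor : maskOf (l ++ [c]) = 2 ^ c.toNat ||| maskOf l := by
      rw [hmm]
      have := Nat.two_pow_add_eq_or_of_lt hml 1
      simpa using this
    rw [hor, Nat.testBit_or]
    have ihk := ih (List.pairwise_append.1 hs).1 (fun x hx => (hl x hx).1) k
    rw [Nat.testBit_two_pow]
    simp only [List.mem_append, List.mem_singleton]
    constructor
    · intro h
      rcases Bool.or_eq_true_iff.1 h with h | h
      · have : c.toNat = k := of_decide_eq_true h
        right; omega
      · exact Or.inl (ihk.1 h)
    · intro h
      rcases h with h | rfl
      · exact Bool.or_eq_true_iff.2 (Or.inr (ihk.2 h))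
      · refine Bool.or_eq_true_iff.2 (Or.inl ?_)
        simp

-- ---- picks facts ----
theorem picks_mem_decomp : ∀ (l : List Int) (b : Int) (rest : List Int),
    (b, rest) ∈ picks l → ∃ l1 l2, l = l1 ++ b :: l2 ∧ rest = l1 ++ l2 := by
  intro l
  induction l with
  | nil => simp [picks]
  | cons x xs ih =>
    intro b rest h
    simp only [picks, List.mem_cons, List.mem_map] at h
    rcases h with h | ⟨q, hq, hq2⟩
    · exact ⟨[], xs, by simp [Prod.ext_iff] at h; simp [h.1, h.2]⟩
    · obtain ⟨l1, l2, h1, h2⟩ := ih q.1 q.2 (by simpa using hq)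
      have hb : q.1 = b := congrArg Prod.fst hq2
      have hr : x :: q.2 = rest := congrArg Prod.snd hq2
      exact ⟨x :: l1, l2, by simp [h1, hb], by simp [← hr, h2]⟩

theorem picks_mem_intro : ∀ (l1 l2 : List Int) (b : Int),
    (b, l1 ++ l2) ∈ picks (l1 ++ b :: l2) := by
  intro l1
  induction l1 with
  | nil => intro l2 b; simp [picks]
  | cons x xs ih =>
    intro l2 b
    simp only [List.cons_append, picks, List.mem_cons, List.mem_map]
    right
    exact ⟨(b, xs ++ l2), ih l2 b, rfl⟩

-- ---- A's inner loop collapses to a feasibility test ----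
theorem foldl_cost (path : List (List Int)) (n : Int) :
    ∀ (p : List Int) (prev acc : Int),
      (p.foldl (fun (st : Int × Int) bunny => (st.1 + mat path st.2 (bunny + 1), bunny + 1)) (acc, prev)).1 +
        mat path (p.foldl (fun (st : Int × Int) bunny => (st.1 + mat path st.2 (bunny + 1), bunny + 1)) (acc, prev)).2 (n + 1)
      = acc + FC path n prev p := by
  intro p
  induction p with
  | nil => intro prev acc; simp [FC]
  | cons b bs ih =>
    intro prev acc
    simp only [List.foldl_cons, FC]
    rw [ih (b + 1) (acc + mat path prev (b + 1))]
    ring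

theorem permScan_eq (path : List (List Int)) (time n : Int) (sub : List Int) :
    ∀ (ps : List (List Int)) (res : List Int),
      permScan path time n sub ps res =
        if (∃ p ∈ ps, FC path n 0 p ≤ time) ∧ sub.length > res.length then sub else res := by
  intro ps
  induction ps with
  | nil => intro res; simp [permScan]
  | cons p rest ih =>
    intro res
    rw [permScan]
    have hc := foldl_cost path n p 0 0
    rw [hc]
    by_cases h1 : (0 : Int) + FC path n 0 p ≤ time
    · by_cases h2 : sub.length > res.length
      · rw [if_pos ⟨h1, h2⟩]
        have hsub : permScan path time n sub rest sub = sub := by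
          rw [ih sub]
          simp
        have hres : (if (∃ q ∈ p :: rest, FC path n 0 q ≤ time) ∧ sub.length > res.length
            then sub else res) = sub := by
          rw [if_pos ⟨⟨p, List.mem_cons_self, by linarith⟩, h2⟩]
        rw [hres]
        split <;> [rfl; exact hsub]
      · rw [if_neg (by tauto), ih res, if_neg (by tauto), if_neg (by tauto)]
    · rw [if_neg (by tauto), ih res]
      by_cases h3 : (∃ q ∈ rest, FC path n 0 q ≤ time) ∧ sub.length > res.length
      · rw [if_pos h3, if_pos ⟨⟨h3.1.choose, List.mem_cons_of_mem _ h3.1.choose_spec.1, h3.1.choose_spec.2⟩, h3.2⟩]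
      · rw [if_neg h3]
        rw [if_neg ?_]
        intro hcon
        apply h3
        refine ⟨?_, hcon.2⟩
        obtain ⟨⟨q, hq, hqle⟩, _⟩ := hcon
        rcases List.mem_cons.1 hq with rfl | hq'
        · exact absurd (by linarith : (0:Int) + FC path n 0 q ≤ time) h1
        · exact ⟨q, hq', hqle⟩

-- ---- combinations give sorted sublists ----
theorem combs_sublist : ∀ (xs : List Int) (r : Nat) (sub : List Int),
    sub ∈ combs xs r → sub.Sublist xs := by
  intro xs
  induction xs with
  | nil =>
    intro r sub h
    cases r with
    | zero => simp [combs] at h; simp [h]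
    | succ r => simp [combs] at h
  | cons x xs ih =>
    intro r sub h
    cases r with
    | zero => simp [combs] at h; simp [h]
    | succ r =>
      simp only [combs, List.mem_append, List.mem_map] at h
      rcases h with ⟨c, hc, rfl⟩ | h
      · exact List.Sublist.cons₂ x (ih r c hc)
      · exact List.Sublist.cons x (ih (r + 1) sub h)

-- ---- the Held–Karp bridge: Gm is the min over A's permutations ----
theorem Gm_zero (path : List (List Int)) (nn : Nat) (pos : Int) :
    Gm path nn pos 0 = mat path pos ((nn : Int) + 1) := by
  rw [Gm]; simp

theorem maskOf_nil : maskOf [] = 0 := rfl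

theorem bridge (path : List (List Int)) (nn : Nat) (sub : List Int) (prev : Int)
    (hs : sub.Pairwise (· < ·)) (hb : ∀ b ∈ sub, 0 ≤ b ∧ b < (nn : Int)) :
    (∃ p ∈ perms sub, FC path (nn : Int) prev p = Gm path nn prev (maskOf sub)) ∧
    (∀ p ∈ perms sub, Gm path nn prev (maskOf sub) ≤ FC path (nn : Int) prev p) := by
  cases hsub : sub with
  | nil =>
    constructor
    · exact ⟨[], by simp [perms], by rw [maskOf_nil, Gm_zero]; rfl⟩
    · intro p hp
      simp [perms] at hp
      subst hp
      rw [maskOf_nil, Gm_zero]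
      simp [FC]
  | cons x xs =>
    rw [hsub] at hs hb
    have hx : x ∈ x :: xs := List.mem_cons_self
    have hm0 : maskOf (x :: xs) ≠ 0 := by
      rw [maskOf_cons]
      have := Nat.two_pow_pos x.toNat
      omega
    set m := maskOf (x :: xs) with hmdef
    have hbits : ∀ k : Nat, (m.testBit k = true) ↔ ((k : Int) ∈ x :: xs) :=
      testBit_maskOf (x :: xs) hs (fun b h => (hb b h).1)
    rw [Gm_eq path nn prev m hm0]
    set f : Nat → Int := fun k => mat path prev ((k : Int) + 1) + Gm path nn ((k : Int) + 1) (m - 2 ^ k) with hfdef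
    set L : List Int := ((List.range nn).filter (fun k => m.testBit k)).map f with hLdef
    -- generic facts about an element b of sub and its pick-decomposition
    have decomp : ∀ (l1 l2 : List Int) (b : Int), x :: xs = l1 ++ b :: l2 →
        (b.toNat ∈ (List.range nn).filter (fun k => m.testBit k)) ∧
        maskOf (l1 ++ l2) = m - 2 ^ b.toNat ∧
        (l1 ++ l2).Pairwise (· < ·) ∧ (∀ c ∈ l1 ++ l2, 0 ≤ c ∧ c < (nn : Int)) ∧
        (l1 ++ l2).length < (x :: xs).length ∧ ((b.toNat : Int) = b) := by
      intro l1 l2 b hdec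
      have hbmem : b ∈ x :: xs := by rw [hdec]; simp
      have hbb := hb b hbmem
      have hcast : ((b.toNat : Int)) = b := Int.toNat_of_nonneg hbb.1
      have hrs : (l1 ++ l2).Sublist (x :: xs) := by
        rw [hdec]
        exact (List.sublist_cons_self b l2).append_left l1
      have hmask : maskOf (l1 ++ l2) = m - 2 ^ b.toNat ∧ 2 ^ b.toNat ≤ m := by
        have h1 : m = maskOf l1 + (2 ^ b.toNat + maskOf l2) := by
          rw [hmdef, hdec, maskOf_append, maskOf_cons]
        have h2 : maskOf (l1 ++ l2) = maskOf l1 + maskOf l2 := maskOf_append l1 l2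
        omega
      refine ⟨?_, hmask.1, List.Pairwise.sublist hrs hs, fun c hc => hb c (hrs.subset hc), ?_, hcast⟩
      · rw [List.mem_filter]
        constructor
        · rw [List.mem_range]; have := hbb.2; omega
        · rw [hbits b.toNat, hcast]; exact hbmem
      · have := hrs.length_le
        have h3 : (x :: xs).length = (l1 ++ b :: l2).length := by rw [hdec]
        simp at h3 ⊢
        omega
    constructor
    · -- existence: the minimum is attained by some permutation
      have hx0 : x.toNat ∈ (List.range nn).filter (fun k => m.testBit k) :=
        (decomp [] xs x rfl).1
      have hLne : L ≠ [] :=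
        List.ne_nil_of_mem (List.mem_map_of_mem (l := (List.range nn).filter (fun k => m.testBit k)) (f := f) hx0)
      obtain ⟨k, hkmem, hkeq⟩ := List.mem_map.1 (pyMinList_mem L hLne)
      have hksub : ((k : Int)) ∈ x :: xs := (hbits k).1 ((List.mem_filter.1 hkmem).2)
      obtain ⟨l1, l2, hdec⟩ := List.append_of_mem hksub
      obtain ⟨_, hmask, hps, hbs, hlen, hcast⟩ := decomp l1 l2 (k : Int) hdec
      have htn : ((k : Int)).toNat = k := by omega
      rw [htn] at hmask
      obtain ⟨q, hq, hqeq⟩ := (bridge path nn (l1 ++ l2) ((k : Int) + 1) hps hbs).1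
      refine ⟨(k : Int) :: q, ?_, ?_⟩
      · rw [perms_cons, List.mem_flatMap]
        refine ⟨((k : Int), l1 ++ l2), ?_, List.mem_map_of_mem hq⟩
        rw [hdec]
        exact picks_mem_intro l1 l2 (k : Int)
      · show mat path prev ((k : Int) + 1) + FC path (nn : Int) ((k : Int) + 1) q = _
        rw [hqeq, hmask]
        exact hkeq
    · -- lower bound: Gm is ≤ the cost of every permutation
      intro p hp
      rw [perms_cons, List.mem_flatMap] at hp
      obtain ⟨pr, hpr, hp2⟩ := hp
      obtain ⟨q, hq, rfl⟩ := List.mem_map.1 hp2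
      obtain ⟨l1, l2, hdec, hrest⟩ := picks_mem_decomp (x :: xs) pr.1 pr.2 (by simpa using hpr)
      obtain ⟨hkf, hmask, hps, hbs, hlen, hcast⟩ := decomp l1 l2 pr.1 hdec
      have hIH := (bridge path nn (l1 ++ l2) (pr.1 + 1) hps hbs).2 q (by rw [← hrest]; exact hq)
      have hfk : f pr.1.toNat ∈ L := List.mem_map_of_mem hkf
      have hle : pyMinList L ≤ f pr.1.toNat := pyMinList_le L _ hfk
      have hfval : f pr.1.toNat = mat path prev (pr.1 + 1) + Gm path nn (pr.1 + 1) (maskOf (l1 ++ l2)) := by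
        rw [hfdef]
        simp only [hmask, hcast]
      show pyMinList L ≤ mat path prev (pr.1 + 1) + FC path (nn : Int) (pr.1 + 1) q
      rw [hmask] at hIH
      rw [hfval, hmask] at hle
      linarith
termination_by sub.length
decreasing_by all_goals (rw [hsub]; exact hlen)

-- ---- B's dp table computes Gm ----
def dpRow0 (path : List (List Int)) (nn : Nat) : List Int :=
  (List.range (nn + 1)).map (fun (pos : Nat) => mat path pos ((nn : Int) + 1))

def dpStep (path : List (List Int)) (nn : Nat) (dp : List (List Int)) (mask : Nat) : List (List Int) :=
  dp ++ [(List.range (nn + 1)).map (fun (pos : Nat) =>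
    pyMinList ((List.range nn).filterMap (fun k =>
      if mask.testBit k then
        some (mat path pos (k + 1) + (dp.getD (mask - 2 ^ k) []).getD (k + 1) 0)
      else none)))]

theorem filterMap_if (l : List Nat) (p : Nat → Bool) (f : Nat → Int) :
    l.filterMap (fun k => if p k then some (f k) else none) = (l.filter p).map f := by
  induction l with
  | nil => simp
  | cons a t ih =>
    rw [List.filterMap_cons]
    by_cases h : p a = true
    · rw [if_pos h, List.filter_cons_of_pos h, List.map_cons, ih]
    · rw [if_neg h, List.filter_cons_of_neg (by simpa using h), ih]

theorem getD_append_left' (l1 l2 : List (List Int)) (m : Nat) (h : m < l1.length) :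
    (l1 ++ l2).getD m [] = l1.getD m [] := by
  rw [List.getD_eq_getElem?_getD, List.getElem?_append_left h, ← List.getD_eq_getElem?_getD]

theorem getD_append_singleton_self (l1 : List (List Int)) (x : List Int) (m : Nat)
    (h : l1.length = m) : (l1 ++ [x]).getD m [] = x := by
  rw [List.getD_eq_getElem?_getD, List.getElem?_append_right (by omega)]
  subst h
  simp

theorem getD_map_range' (f : Nat → Int) (n pos : Nat) (h : pos < n) :
    ((List.range n).map f).getD pos 0 = f pos := by
  rw [List.getD_eq_getElem?_getD, List.getElem?_map, List.getElem?_range h]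
  rfl

theorem dpFold_spec (path : List (List Int)) (nn : Nat) :
    ∀ c : Nat, c < 2 ^ nn →
      ((List.range' 1 c).foldl (dpStep path nn) [dpRow0 path nn]).length = c + 1 ∧
      (∀ m : Nat, m ≤ c → ∀ pos : Nat, pos ≤ nn →
        ((((List.range' 1 c).foldl (dpStep path nn) [dpRow0 path nn]).getD m []).getD pos 0)
          = Gm path nn (pos : Int) m) := by
  intro c
  induction c with
  | zero =>
    intro _
    constructor
    · simp
    · intro m hm pos hpos
      interval_cases m
      show ((dpRow0 path nn).getD pos 0) = _
      rw [dpRow0, getD_map_range' _ _ _ (by omega), Gm_zero]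
  | succ c ih =>
    intro hc
    obtain ⟨ihlen, ihval⟩ := ih (by omega)
    have hconcat : List.range' 1 (c + 1) = List.range' 1 c ++ [c + 1] := by
      have h1 : 1 + 1 * c = c + 1 := by omega
      rw [List.range'_concat, h1]
    rw [hconcat, List.foldl_append, List.foldl_cons, List.foldl_nil]
    set D := (List.range' 1 c).foldl (dpStep path nn) [dpRow0 path nn] with hD
    constructor
    · rw [dpStep, List.length_append, ihlen]; simp
    · intro m hm pos hpos
      by_cases hmc : m ≤ c
      · -- entry from the old table
        rw [dpStep, getD_append_left' D _ m (by omega)]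
        exact ihval m hmc pos hpos
      · have hm1 : m = c + 1 := by omega
        subst hm1
        rw [dpStep, getD_append_singleton_self D _ (c + 1) (by omega),
           getD_map_range' _ _ _ (by omega), filterMap_if]
        have hcongr : ((List.range nn).filter (fun k => (c + 1).testBit k)).map
            (fun (k : Nat) => mat path pos (k + 1) + (D.getD ((c + 1) - 2 ^ k) []).getD (k + 1) 0)
          = ((List.range nn).filter (fun k => (c + 1).testBit k)).map
            (fun (k : Nat) => mat path ((pos : Int)) ((k : Int) + 1) + Gm path nn ((k : Int) + 1) ((c + 1) - 2 ^ k)) := by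
          apply List.map_congr_left
          intro k hk
          have hkn : k < nn := List.mem_range.1 (List.mem_of_mem_filter hk)
          have h2k : 1 ≤ 2 ^ k := Nat.one_le_two_pow
          have := ihval ((c + 1) - 2 ^ k) (by omega) (k + 1) (by omega)
          rw [this]
          norm_cast
        rw [hcongr, ← Gm_eq path nn (pos : Int) (c + 1) (by omega)]

-- ===== VERDICT (by name: the statement is the Claim_ definition above) =====
theorem rescue_bunnies_spec : Claim_equal_rescue_bunnies := by
  intro path time _ hpre
  unfold Spec_rescue_bunnies
  obtain ⟨hlen2, _⟩ := hpre
  set nn : Nat := path.length - 2 with hnn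
  have e1 : (path.length : Int) - 2 = (nn : Int) := by omega
  have e2 : (((nn : Int)) + 1).toNat = nn + 1 := by omega
  have e3 : ((nn : Int)).toNat = nn := by omega
  have hA : rescue_bunnies path time =
      (List.range (nn + 1)).foldl
        (fun res i => (combs (PySem.List.pyRange 0 (nn : Int) 1) i).foldl
          (fun res sub => permScan path time (nn : Int) sub (perms sub) res) res) [] := by
    rw [rescue_bunnies]
    rw [e1, e2, List.foldl_flatMap]
  have hB : rescue_bunnies_alt path time =
      (List.range (nn + 1)).foldl
        (fun best r => (combs (PySem.List.pyRange 0 (nn : Int) 1) r).foldl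
          (fun best sub =>
            if sub.length > best.length then
              if ((((List.range' 1 (2 ^ nn - 1)).foldl (dpStep path nn) [dpRow0 path nn]).getD
                    (maskOf sub) []).getD 0 0) ≤ time then sub
              else best
            else best) best) [] := by
    rw [rescue_bunnies_alt]
    rw [e1, e3]
    rfl
  rw [hA, hB]
  apply PySem.List.foldl_congr_mem
  intro acc i _
  apply PySem.List.foldl_congr_mem
  intro res sub hsubmem
  have hsl : sub.Sublist (PySem.List.pyRange 0 (nn : Int) 1) :=
    combs_sublist _ i sub hsubmem
  have hs : sub.Pairwise (· < ·) :=
    List.Pairwise.sublist hsl (PySem.List.pairwise_lt_pyRange_one 0 (nn : Int) )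
  have hbnd : ∀ b ∈ sub, 0 ≤ b ∧ b < (nn : Int) := by
    intro b hbmem
    have := (PySem.List.mem_pyRange_one).1 (hsl.subset hbmem)
    omega
  rw [permScan_eq]
  by_cases hlt : sub.length > res.length
  · have hmask : maskOf sub < 2 ^ nn := maskOf_lt_pow sub hs nn hbnd
    have hdp : ((((List.range' 1 (2 ^ nn - 1)).foldl (dpStep path nn) [dpRow0 path nn]).getD
        (maskOf sub) []).getD 0 0) = Gm path nn 0 (maskOf sub) := by
      have h2 : (0 : Nat) < 2 ^ nn := Nat.two_pow_pos nn
      have := (dpFold_spec path nn (2 ^ nn - 1) (by omega)).2 (maskOf sub) (by omega) 0 (by omega)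
      simpa using this
    have hbr := bridge path nn sub 0 hs hbnd
    have hiff : (∃ p ∈ perms sub, FC path (nn : Int) 0 p ≤ time) ↔
        Gm path nn 0 (maskOf sub) ≤ time := by
      constructor
      · rintro ⟨p, hp, hple⟩
        exact le_trans (hbr.2 p hp) hple
      · intro h
        obtain ⟨p, hp, hpe⟩ := hbr.1
        exact ⟨p, hp, by rw [hpe]; exact h⟩
    rw [hdp]
    by_cases hfe : Gm path nn 0 (maskOf sub) ≤ time
    · rw [if_pos ⟨hiff.2 hfe, hlt⟩, if_pos hlt, if_pos hfe]
    · rw [if_neg (fun hcon => hfe (hiff.1 hcon.1)), if_pos hlt, if_neg hfe]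
  · rw [if_neg (fun hcon => hlt hcon.2), if_neg hlt]
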